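-- pv_equiv track=rewrite | github.com/liangxiaoping/chimera | chimera/utils.py | quote_string
-- ===== SOURCE A (Python) =====
-- def quote_string(string):
--     inparts = string.split(' ')
--     outparts = []
--     tmp = None
--
--     for part in inparts:
--         if part == '':
--             continue
--         elif part[0] == '"' and part[-1:] == '"' and part[-2:] != '\\"':
--             # Handle Quoted Words
--             outparts.append(part.strip('"'))
--         elif part[0] == '"':
--             # Handle Start of Quoted Sentance
--             tmp = part[1:]
--         elif tmp is not None and part[-1:] == '"' and part[-2:] != '\\"':
--             # Handle End of Quoted Sentance
--             tmp += " " + part.strip('"')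
--             outparts.append(tmp)
--             tmp = None
--         elif tmp is not None:
--             # Handle Middle of Quoted Sentance
--             tmp += " " + part
--         else:
--             # Handle Standalone words
--             outparts.append(part)
--
--     if tmp is not None:
--         # Handle unclosed quoted strings
--         outparts.append(tmp)
--
--     # This looks odd, but both calls are necessary to ensure the end results
--     # is always consistent.
--     outparts = [o.replace('\\"', '"') for o in outparts]
--     outparts = [o.replace('"', '\\"') for o in outparts]
--
--     return '"' + '" "'.join(outparts) + '"'
-- ===== SOURCE B (Python) =====
-- def quote_string(string):
--     parts = string.split(' ')
--     toks = []
--     i, n = 0, len(parts)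
--     while i < n:
--         p = parts[i]
--         i += 1
--         if p == '':
--             continue
--         if p.startswith('"') and p.endswith('"') and not p.endswith('\\"'):
--             # fully-quoted word
--             toks.append(p.strip('"'))
--         elif p.startswith('"'):
--             # opening quote: consume parts until one closes it (or they run out)
--             acc = p[1:]
--             while i < n:
--                 q = parts[i]
--                 i += 1
--                 if q == '':
--                     continue
--                 if q.startswith('"') and q.endswith('"') and not q.endswith('\\"'):
--                     toks.append(q.strip('"'))
--                 elif q.startswith('"'):
--                     acc = q[1:]
--                 elif q.endswith('"') and not q.endswith('\\"'):
--                     acc += " " + q.strip('"')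
--                     break
--                 else:
--                     acc += " " + q
--             toks.append(acc)
--         else:
--             toks.append(p)
--     return '"' + '" "'.join(t.replace('\\"', '"').replace('"', '\\"') for t in toks) + '"'
-- ===== Notes on version B (the rewrite author's own statement) =====
-- stated objective: alternative
-- what changed: A's single for-loop with a nullable tmp state variable is replaced by an outer index loop plus an inner loop that consumes the parts of an open quoted sentence until it is closed or the parts run out, so no Optional state survives an iteration; the re-quoting phase fuses A's two list passes of replace into one pass per token.
import Mathlib
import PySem

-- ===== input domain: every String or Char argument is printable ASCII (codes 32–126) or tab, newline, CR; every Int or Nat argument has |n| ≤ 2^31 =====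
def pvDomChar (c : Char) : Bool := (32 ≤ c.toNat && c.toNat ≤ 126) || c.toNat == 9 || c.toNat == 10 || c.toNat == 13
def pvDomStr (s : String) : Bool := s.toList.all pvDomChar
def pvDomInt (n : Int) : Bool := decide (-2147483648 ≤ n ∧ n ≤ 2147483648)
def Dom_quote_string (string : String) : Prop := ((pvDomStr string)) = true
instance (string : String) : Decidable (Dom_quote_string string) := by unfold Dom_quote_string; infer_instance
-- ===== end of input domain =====

-- B replaces A's single loop with a nullable `tmp` state by an index-style outer/inner loop
-- decomposition (inner loop consumes the quoted sentence); same objective: alternative decomposition.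

-- ===== PORT A =====
-- one iteration of A's for-loop: state = (outparts, tmp)
def qsStepA (st : List (List Char) × Option (List Char)) (part : List Char) :
    List (List Char) × Option (List Char) :=
  if part = [] then st
  else if PySem.List.pyGet? part 0 = some '"' ∧ PySem.List.slice part (some (-1)) none = ['"'] ∧
          PySem.List.slice part (some (-2)) none ≠ ['\\', '"'] then
    (st.1 ++ [PySem.Chars.stripChars part ['"']], st.2)
  else if PySem.List.pyGet? part 0 = some '"' then
    (st.1, some (PySem.List.slice part (some 1) none))
  else
    match st.2 with
    | some t =>
      if PySem.List.slice part (some (-1)) none = ['"'] ∧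
         PySem.List.slice part (some (-2)) none ≠ ['\\', '"'] then
        (st.1 ++ [t ++ ' ' :: PySem.Chars.stripChars part ['"']], none)
      else
        (st.1, some (t ++ ' ' :: part))
    | none => (st.1 ++ [part], none)

def quote_string (string : String) : String :=
  let inparts := PySem.Chars.splitOn string.toList [' ']
  let res := inparts.foldl qsStepA ([], none)
  let outparts := match res.2 with | some t => res.1 ++ [t] | none => res.1
  let outparts := outparts.map (fun o => PySem.Chars.replace o ['\\', '"'] ['"'])
  let outparts := outparts.map (fun o => PySem.Chars.replace o ['"'] ['\\', '"'])
  String.ofList ('"' :: PySem.Chars.join ['"', ' ', '"'] outparts ++ ['"'])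

-- ===== PORT B =====
def qsFull (p : List Char) : Bool :=
  PySem.Chars.startswith p ['"'] && PySem.Chars.endswith p ['"'] && !PySem.Chars.endswith p ['\\', '"']

def qsClose (p : List Char) : Bool :=
  PySem.Chars.endswith p ['"'] && !PySem.Chars.endswith p ['\\', '"']

mutual
-- B's outer while-loop (no open quote)
def qsParseO : List (List Char) → List (List Char)
  | [] => []
  | p :: rest =>
    if p = [] then qsParseO rest
    else if qsFull p then PySem.Chars.stripChars p ['"'] :: qsParseO rest
    else if PySem.Chars.startswith p ['"'] then qsParseI (PySem.List.slice p (some 1) none) rest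
    else p :: qsParseO rest
-- B's inner while-loop (accumulating an open quoted sentence)
def qsParseI : List Char → List (List Char) → List (List Char)
  | acc, [] => [acc]
  | acc, q :: rest =>
    if q = [] then qsParseI acc rest
    else if qsFull q then PySem.Chars.stripChars q ['"'] :: qsParseI acc rest
    else if PySem.Chars.startswith q ['"'] then qsParseI (PySem.List.slice q (some 1) none) rest
    else if qsClose q then (acc ++ ' ' :: PySem.Chars.stripChars q ['"']) :: qsParseO rest
    else qsParseI (acc ++ ' ' :: q) rest
end

def quote_string_alt (string : String) : String :=
  let toks := qsParseO (PySem.Chars.splitOn string.toList [' '])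
  String.ofList ('"' :: PySem.Chars.join ['"', ' ', '"']
    (toks.map (fun t =>
      PySem.Chars.replace (PySem.Chars.replace t ['\\', '"'] ['"']) ['"'] ['\\', '"'])) ++ ['"'])

-- ===== PRECONDITION & SPEC =====
def Spec_quote_string (string : String) (out : String) : Prop := out = quote_string_alt string
instance (string : String) (out : String) : Decidable (Spec_quote_string string out) := by unfold Spec_quote_string; infer_instance

-- ===== CLAIM (what is proved, stated in full; the proofs are below) =====
def Claim_equal_quote_string : Prop := ∀ (string : String), Dom_quote_string string → Spec_quote_string string (quote_string string)

-- ===== LEMMAS AND PROOFS =====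
def qsFinalize (st : List (List Char) × Option (List Char)) : List (List Char) :=
  match st.2 with | some t => st.1 ++ [t] | none => st.1

theorem qs_suffix_iff_drop (p t : List Char) :
    t <:+ p ↔ p.drop (p.length - t.length) = t := by
  constructor
  · rintro ⟨s, rfl⟩
    simp
  · intro h
    set n := p.length - t.length with hn
    exact ⟨p.take n, by rw [← h]; exact List.take_append_drop n p⟩

theorem qs_slice_last_iff (p : List Char) :
    PySem.List.slice p (some (-1)) none = ['"'] ↔ PySem.Chars.endswith p ['"'] = true := by
  rw [PySem.List.slice_from_neg_one, PySem.Chars.endswith_iff, qs_suffix_iff_drop]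
  simp

theorem qs_slice_last2_iff (p : List Char) :
    PySem.List.slice p (some (-2)) none = ['\\', '"'] ↔
      PySem.Chars.endswith p ['\\', '"'] = true := by
  rw [PySem.List.slice_from_neg_ofNat p 2 (by omega), PySem.Chars.endswith_iff,
    qs_suffix_iff_drop]
  simp

theorem qs_head_iff (p : List Char) :
    PySem.List.pyGet? p 0 = some '"' ↔ PySem.Chars.startswith p ['"'] = true := by
  cases p with
  | nil => simp [PySem.List.pyGet?, PySem.Chars.startswith]
  | cons c cs =>
    rw [PySem.Chars.startswith_iff]
    simp [PySem.List.pyGet?, PySem.List.pyIdx?, List.cons_prefix_cons, eq_comm]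

-- A's step, with its conditions rewritten into B's boolean tests
theorem qsStepA_eq (st : List (List Char) × Option (List Char)) (p : List Char) :
    qsStepA st p =
      if p = [] then st
      else if qsFull p then (st.1 ++ [PySem.Chars.stripChars p ['"']], st.2)
      else if PySem.Chars.startswith p ['"'] then
        (st.1, some (PySem.List.slice p (some 1) none))
      else
        match st.2 with
        | some t =>
          if qsClose p then (st.1 ++ [t ++ ' ' :: PySem.Chars.stripChars p ['"']], none)
          else (st.1, some (t ++ ' ' :: p))
        | none => (st.1 ++ [p], none) := by
  simp only [qsStepA, qsFull, qsClose, qs_head_iff, qs_slice_last_iff, qs_slice_last2_iff,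
    ne_eq, Bool.and_eq_true, Bool.not_eq_true', Bool.not_eq_true, and_assoc]

theorem qs_parse_eq (parts : List (List Char)) :
    (∀ out, qsFinalize (parts.foldl qsStepA (out, none)) = out ++ qsParseO parts)
    ∧ (∀ out acc, qsFinalize (parts.foldl qsStepA (out, some acc)) = out ++ qsParseI acc parts) := by
  induction parts with
  | nil =>
    exact ⟨fun out => by simp [qsFinalize, qsParseO],
           fun out acc => by simp [qsFinalize, qsParseI]⟩
  | cons p rest ih =>
    constructor
    · intro out
      rw [List.foldl_cons, qsStepA_eq, qsParseO]
      by_cases h0 : p = []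
      · simp only [if_pos h0, ih.1]
      rw [if_neg h0, if_neg h0]
      by_cases hF : qsFull p = true
      · simp [hF, ih.1]
      rw [if_neg hF, if_neg hF]
      by_cases hS : PySem.Chars.startswith p ['"'] = true
      · simp [hS, ih.2]
      rw [if_neg hS, if_neg hS]
      simp [ih.1]
    · intro out acc
      rw [List.foldl_cons, qsStepA_eq, qsParseI]
      by_cases h0 : p = []
      · simp only [if_pos h0, ih.2]
      rw [if_neg h0, if_neg h0]
      by_cases hF : qsFull p = true
      · simp [hF, ih.2]
      rw [if_neg hF, if_neg hF]
      by_cases hS : PySem.Chars.startswith p ['"'] = true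
      · simp [hS, ih.2]
      rw [if_neg hS, if_neg hS]
      by_cases hC : qsClose p = true
      · simp [hC, ih.1]
      simp [hC, ih.2]

-- ===== VERDICT (by name: the statement is the Claim_ definition above) =====
theorem quote_string_spec : Claim_equal_quote_string := by
  intro s _
  have h := (qs_parse_eq (PySem.Chars.splitOn s.toList [' '])).1 []
  simp only [qsFinalize, List.nil_append] at h
  unfold Spec_quote_string quote_string quote_string_alt
  simp only [List.map_map, Function.comp_def]
  rw [h]
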